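-- pv_equiv track=rewrite | github.com/fernandocostar/competitive-programming | uri/1089.py | solve
-- ===== SOURCE A (Python) =====
-- def solve(vet):
-- 	count = 0
-- 	vet += [vet[0], vet[-1]]
-- 	keep = []
-- 	ASCENDING = 1
-- 	DESCENDING = -1
-- 	status = 0 #-1 descending / 1 ascending
-- 	for i in range(len(vet)-1):
-- 		if vet[i] < vet[i+1] and status == DESCENDING:
-- 			count += 1
-- 			status = ASCENDING
-- 			keep.append(-1)
-- 		elif vet[i] > vet[i+1] and status == ASCENDING:
-- 			count += 1
-- 			status = DESCENDING
-- 			keep.append(1)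
-- 		if vet[i] < vet[i+1]:
-- 			status = ASCENDING
-- 		elif vet[i] > vet[i+1]:
-- 			status = DESCENDING
-- 	count -= 1 if keep[0] == keep[-1] else 0
-- 	return count
-- ===== SOURCE B (Python) =====
-- def solve(vet):
--     vet += [vet[0], vet[-1]]
--     s = [1 if a < b else -1 for a, b in zip(vet, vet[1:]) if a != b]
--     t = sum(1 for x, y in zip(s, s[1:]) if x != y)
--     return t - t % 2
-- ===== Notes on version B (the rewrite author's own statement) =====
-- stated objective: simpler
-- what changed: A's single stateful loop (status flag, a 'keep' list of switch markers, and a final correction comparing keep's first and last entries) is replaced by sign compression: build the nonzero sign list of adjacent differences of the wrapped vector, count adjacent sign transitions t, and return t - t%2 (switch directions strictly alternate, so A's first-equals-last correction is exactly the parity of t).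
-- outside the precondition, e.g. on solve([5, 5]): A raises IndexError, B returns 0; on solve([]): A raises IndexError, B raises IndexError
-- crash fix: On nonempty lists whose elements are all equal, A raises IndexError (it reads the first entry of the keep list, which stays empty because the wrapped sequence has no direction change); B returns 0. — e.g. on solve([5, 5]): A raises IndexError, B returns 0
import Mathlib
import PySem

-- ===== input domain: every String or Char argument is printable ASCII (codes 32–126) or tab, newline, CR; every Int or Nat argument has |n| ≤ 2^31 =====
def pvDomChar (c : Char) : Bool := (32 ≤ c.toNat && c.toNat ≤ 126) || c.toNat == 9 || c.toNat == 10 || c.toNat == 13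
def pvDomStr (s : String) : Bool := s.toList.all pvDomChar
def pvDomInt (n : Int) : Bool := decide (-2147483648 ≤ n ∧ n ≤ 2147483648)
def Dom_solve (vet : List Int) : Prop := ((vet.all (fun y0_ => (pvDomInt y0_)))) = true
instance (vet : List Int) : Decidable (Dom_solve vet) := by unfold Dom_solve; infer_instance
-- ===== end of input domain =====

-- B replaces A's stateful status/keep loop by sign compression + a transition count with a parity
-- correction; equivalence is about the RETURN value (both Pythons append [vet[0], vet[-1]] to vet in place).

-- ===== PORT A =====
-- A's for-loop over i with vet[i], vet[i+1]: the obvious structural recursion over adjacent pairs,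
-- carrying the same state (count, status, keep).
def solveLoop : Int → Int → List Int → List Int → Int × Int × List Int
  | count, status, keep, a :: b :: rest =>
      let s1 : Int × Int × List Int :=
        if a < b ∧ status = -1 then (count + 1, (1 : Int), keep ++ [(-1 : Int)])
        else if b < a ∧ status = 1 then (count + 1, (-1 : Int), keep ++ [(1 : Int)])
        else (count, status, keep)
      let status' : Int := if a < b then 1 else if b < a then -1 else s1.2.1
      solveLoop s1.1 status' s1.2.2 (b :: rest)
  | count, status, keep, _ => (count, status, keep)

def solve (vet : List Int) : Int :=
  -- Python: vet += [first element, last element]; headI/getLastD are only read under Pre_solve (vet ≠ [])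
  let w := vet ++ [vet.headI, vet.getLastD 0]
  let r := solveLoop 0 0 [] w
  -- Python reads keep's first and last entries; the defaults are only reachable outside Pre_solve (keep = [])
  r.1 - (if r.2.2.headI = r.2.2.getLastD 0 then 1 else 0)

-- ===== PORT B =====
-- nonzero signs of adjacent differences
def signsB (w : List Int) : List Int :=
  (w.zip w.tail).filterMap (fun p => if p.1 < p.2 then some 1 else if p.2 < p.1 then some (-1) else none)

def solve_alt (vet : List Int) : Int :=
  let w := vet ++ [vet.headI, vet.getLastD 0]
  let s := signsB w
  let t : Int := ((s.zip s.tail).countP (fun p => p.1 != p.2) : Nat)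
  t - t % 2

-- ===== PRECONDITION & SPEC =====
-- Pre_ admits exactly the inputs where A returns: it excludes the empty list (A raises IndexError
-- reading the first element) and lists whose wrapped sequence has no rise or no fall — equivalently,
-- nonempty all-equal lists — where A raises IndexError reading the first entry of the empty keep list.
def Pre_solve (vet : List Int) : Prop :=
  vet ≠ [] ∧
  (((vet ++ [vet.headI, vet.getLastD 0]).zip (vet ++ [vet.headI, vet.getLastD 0]).tail).any
      (fun p => p.1 < p.2)) = true ∧
  (((vet ++ [vet.headI, vet.getLastD 0]).zip (vet ++ [vet.headI, vet.getLastD 0]).tail).any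
      (fun p => p.2 < p.1)) = true
instance (vet : List Int) : Decidable (Pre_solve vet) := by unfold Pre_solve; infer_instance
def pvWitness_solve : List Int := [1, 2, 1]

-- On nonempty lists whose elements are all equal, A raises IndexError (first entry of the empty keep list); B returns 0.
def Raises_solve (vet : List Int) : Prop := vet ≠ [] ∧ ∀ x ∈ vet, x = vet.headI
instance (vet : List Int) : Decidable (Raises_solve vet) := by unfold Raises_solve; infer_instance
def pvRaiseWitness_solve : List Int := [5, 5]
def pvRaiseWitnessOut_solve : Int := 0

def Spec_solve (vet : List Int) (out : Int) : Prop := out = solve_alt vet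
instance (vet : List Int) (out : Int) : Decidable (Spec_solve vet out) := by unfold Spec_solve; infer_instance

-- ===== CLAIM (what is proved, stated in full; the proofs are below) =====
def Claim_equal_solve : Prop := ∀ (vet : List Int), Dom_solve vet → Pre_solve vet → Spec_solve vet (solve vet)
def Claim_raises_solve : Prop :=
  (∀ (vet : List Int), Dom_solve vet → Raises_solve vet → ¬ Pre_solve vet) ∧
  (Dom_solve (pvRaiseWitness_solve) ∧ Raises_solve (pvRaiseWitness_solve) ∧
    solve_alt (pvRaiseWitness_solve) = pvRaiseWitnessOut_solve)

-- ===== LEMMAS AND PROOFS =====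

-- sign-compressed version of A's loop: processes the nonzero sign list
def sloop : Int → Int → List Int → List Int → Int × Int × List Int
  | c, st, k, [] => (c, st, k)
  | c, st, k, d :: ds =>
      if (d = 1 ∧ st = -1) ∨ (d = -1 ∧ st = 1) then sloop (c + 1) d (k ++ [-d]) ds
      else sloop c d k ds

-- transitions of a sign list, given the previous sign
def transN : Int → List Int → Nat
  | _, [] => 0
  | st, d :: ds => (if d = st then 0 else 1) + transN d ds

-- alternating list e, -e, e, …
def altL : Int → Nat → List Int
  | _, 0 => []
  | e, n + 1 => e :: altL (-e) n

lemma signsB_cons₂ (a b : Int) (rest : List Int) :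
    signsB (a :: b :: rest) =
      (if a < b then [(1:Int)] else if b < a then [(-1:Int)] else []) ++ signsB (b :: rest) := by
  simp only [signsB, List.tail, List.zip, List.zipWith, List.filterMap]
  split_ifs <;> simp

lemma solveLoop_eq_sloop : ∀ (w : List Int) (c st : Int) (k : List Int),
    solveLoop c st k w = sloop c st k (signsB w) := by
  intro w
  induction w with
  | nil => intro c st k; simp [solveLoop, signsB, sloop]
  | cons a t ih =>
    cases t with
    | nil => intro c st k; simp [solveLoop, signsB, sloop]
    | cons b rest =>
      intro c st k
      rw [signsB_cons₂]
      rcases lt_trichotomy a b with h | h | h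
      · simp only [solveLoop, if_pos h]
        rw [ih]
        by_cases hst : st = -1
        · simp [sloop, h, hst, not_lt.mpr (le_of_lt h)]
        · have : ¬ (a < b ∧ st = -1) := by tauto
          simp only [this, if_neg this]
          have hba : ¬ b < a := not_lt.mpr (le_of_lt h)
          have : ¬ (b < a ∧ st = 1) := by tauto
          simp [sloop, h, hba, this, hst]
      · subst h
        simp only [solveLoop, lt_irrefl, false_and, if_neg, if_false]
        rw [ih]
        simp
      · have hab : ¬ a < b := not_lt.mpr (le_of_lt h)
        simp only [solveLoop, if_neg hab]
        rw [ih]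
        by_cases hst : st = 1
        · have hc : ¬ (a < b ∧ st = -1) := by tauto
          simp [sloop, hc, h, hst, hab]
        · have hc : ¬ (a < b ∧ st = -1) := by tauto
          have hc2 : ¬ (b < a ∧ st = 1) := by tauto
          simp [sloop, hc, hc2, h, hab, hst]

lemma sloop_spec : ∀ (ds : List Int) (c st : Int) (k : List Int),
    (st = 1 ∨ st = -1) → (∀ d ∈ ds, d = 1 ∨ d = -1) →
    ∃ st', sloop c st k ds = (c + (transN st ds : Int), st', k ++ altL st (transN st ds)) := by
  intro ds
  induction ds with
  | nil => intro c st k _ _; exact ⟨st, by simp [sloop, transN, altL]⟩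
  | cons d ds ih =>
    intro c st k hst hv
    have hd : d = 1 ∨ d = -1 := hv d (by simp)
    have hv' : ∀ x ∈ ds, x = 1 ∨ x = -1 := fun x hx => hv x (by simp [hx])
    by_cases hne : d = st
    · subst hne
      have hcond : ¬ ((d = 1 ∧ d = -1) ∨ (d = -1 ∧ d = 1)) := by
        rcases hd with h | h <;> simp [h]
      obtain ⟨st', hrec⟩ := ih c d k hd hv'
      refine ⟨st', ?_⟩
      simp only [sloop, if_neg hcond, hrec, transN, if_pos rfl]
      simp
    · have hcond : (d = 1 ∧ st = -1) ∨ (d = -1 ∧ st = 1) := by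
        rcases hd with h | h <;> rcases hst with h2 | h2 <;> simp_all
      have hnegd : -d = st := by rcases hcond with ⟨h1, h2⟩ | ⟨h1, h2⟩ <;> simp [h1, h2]
      have hnegst : -st = d := by rw [← hnegd]; ring
      obtain ⟨st', hrec⟩ := ih (c + 1) d (k ++ [-d]) hd hv'
      refine ⟨st', ?_⟩
      simp only [sloop, if_pos hcond, hrec, transN, if_neg hne, Prod.mk.injEq]
      refine ⟨by push_cast; ring, trivial, ?_⟩
      rw [Nat.add_comm 1]
      show k ++ [-d] ++ altL d (transN d ds) = k ++ altL st (transN d ds + 1)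
      simp only [altL, hnegd, hnegst, List.append_assoc]
      rfl

lemma signsB_valid (w : List Int) : ∀ d ∈ signsB w, d = 1 ∨ d = -1 := by
  intro d hd
  simp only [signsB, List.mem_filterMap] at hd
  obtain ⟨p, _, hp⟩ := hd
  split_ifs at hp <;> simp_all

lemma count_eq_transN : ∀ (ds : List Int) (d : Int),
    ((d :: ds).zip ds).countP (fun p => p.1 != p.2) = transN d ds := by
  intro ds
  induction ds with
  | nil => intro d; simp [transN]
  | cons e ds ih =>
    intro d
    simp only [List.zip_cons_cons, List.countP_cons, transN, ← ih e]
    by_cases h : d = e <;> simp [h, Nat.add_comm] <;> omega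

lemma altL_headI (e : Int) (n : Nat) : (altL e (n + 1)).headI = e := by simp [altL]

lemma altL_getLastD : ∀ (n : Nat) (e d : Int),
    (altL e (n + 1)).getLastD d = if (n + 1) % 2 = 1 then e else -e := by
  intro n
  induction n with
  | zero => intro e d; simp [altL]
  | succ m ih =>
    intro e d
    show (e :: altL (-e) (m + 1)).getLastD d = _
    rw [List.getLastD_cons, ih (-e) e]
    have : (m + 1) % 2 = 1 ∨ (m + 1) % 2 = 0 := by omega
    rcases this with h | h
    · have h2 : ¬ (m + 1 + 1) % 2 = 1 := by omega
      simp [h, h2]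
    · have h2 : (m + 1 + 1) % 2 = 1 := by omega
      have h3 : ¬ (m + 1) % 2 = 1 := by omega
      simp [h2, h3]

lemma transN_zero_all_eq : ∀ (ds : List Int) (d : Int), transN d ds = 0 → ∀ x ∈ ds, x = d := by
  intro ds
  induction ds with
  | nil => simp
  | cons e ds ih =>
    intro d h x hx
    simp only [transN] at h
    by_cases hde : e = d
    · subst hde
      simp at h
      rcases List.mem_cons.mp hx with h1 | h1
      · exact h1
      · exact ih e h x h1
    · simp [hde] at h

lemma mem_signsB_pos (w : List Int) :
    ((w.zip w.tail).any (fun p => p.1 < p.2)) = true → (1 : Int) ∈ signsB w := by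
  intro h
  rw [List.any_eq_true] at h
  obtain ⟨p, hp, hlt⟩ := h
  simp only [decide_eq_true_eq] at hlt
  simp only [signsB, List.mem_filterMap]
  exact ⟨p, hp, by simp [hlt]⟩

lemma mem_signsB_neg (w : List Int) :
    ((w.zip w.tail).any (fun p => p.2 < p.1)) = true → (-1 : Int) ∈ signsB w := by
  intro h
  rw [List.any_eq_true] at h
  obtain ⟨p, hp, hlt⟩ := h
  simp only [decide_eq_true_eq] at hlt
  simp only [signsB, List.mem_filterMap]
  refine ⟨p, hp, ?_⟩
  simp [hlt, not_lt.mpr (le_of_lt hlt)]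

-- ===== VERDICT (by name: the statement is the Claim_ definition above) =====
theorem solve_spec : Claim_equal_solve := by
  intro vet _ hpre
  obtain ⟨hne, hrise, hfall⟩ := hpre
  unfold Spec_solve
  simp only [solve, solve_alt]
  set w := vet ++ [vet.headI, vet.getLastD 0] with hw
  have h1 : (1 : Int) ∈ signsB w := mem_signsB_pos w hrise
  have hm1 : (-1 : Int) ∈ signsB w := mem_signsB_neg w hfall
  rw [solveLoop_eq_sloop]
  obtain ⟨d, ds, hs⟩ : ∃ d ds, signsB w = d :: ds := by
    cases hsw : signsB w with
    | nil => rw [hsw] at h1; simp at h1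
    | cons d ds => exact ⟨d, ds, rfl⟩
  rw [hs]
  have hd : d = 1 ∨ d = -1 := signsB_valid w d (hs ▸ List.mem_cons_self ..)
  have hv : ∀ x ∈ ds, x = 1 ∨ x = -1 := fun x hx => signsB_valid w x (hs ▸ List.mem_cons.mpr (Or.inr hx))
  -- first step: status 0 matches neither branch, becomes d
  have hstep : sloop 0 0 [] (d :: ds) = sloop 0 d [] ds := by
    have : ¬ ((d = 1 ∧ (0:Int) = -1) ∨ (d = -1 ∧ (0:Int) = 1)) := by simp
    simp [sloop, this]
  rw [hstep]
  obtain ⟨st', hrec⟩ := sloop_spec ds 0 d [] hd hv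
  rw [hrec]
  -- n ≥ 1: otherwise all signs equal d, contradicting 1 ∈ s and -1 ∈ s
  have hn : transN d ds ≠ 0 := by
    intro h0
    have hall := transN_zero_all_eq ds d h0
    have h1' : (1:Int) = d ∨ (1:Int) ∈ ds := List.mem_cons.mp (hs ▸ h1)
    have hm1' : (-1:Int) = d ∨ (-1:Int) ∈ ds := List.mem_cons.mp (hs ▸ hm1)
    have e1 : (1:Int) = d := by rcases h1' with h | h; exact h; exact hall _ h
    have e2 : (-1:Int) = d := by rcases hm1' with h | h; exact h; exact hall _ h
    omega
  obtain ⟨m, hm⟩ : ∃ m, transN d ds = m + 1 := ⟨transN d ds - 1, by omega⟩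
  simp only [List.tail_cons, count_eq_transN, hm, List.nil_append, zero_add]
  rw [altL_headI, altL_getLastD]
  have hd0 : d ≠ 0 := by rcases hd with h | h <;> simp [h]
  by_cases hpar : (m + 1) % 2 = 1
  · have _hne : d ≠ -d := by intro h; apply hd0; omega
    simp only [if_pos hpar, if_true]
    have hc : (((m + 1) % 2 : Nat) : Int) = ((m + 1 : Nat) : Int) % 2 := Nat.ToInt.mod_congr rfl rfl
    omega
  · have hne2 : d ≠ -d := by intro h; apply hd0; omega
    simp only [if_neg hpar, if_neg hne2]
    have hc : (((m + 1) % 2 : Nat) : Int) = ((m + 1 : Nat) : Int) % 2 := Nat.ToInt.mod_congr rfl rfl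
    omega

@[simp] theorem solve_raises : Claim_raises_solve := by
  unfold Claim_raises_solve
  constructor
  · intro vet _ hr hpre
    obtain ⟨hne, hall⟩ := hr
    obtain ⟨_, hrise, _⟩ := hpre
    rw [List.any_eq_true] at hrise
    obtain ⟨p, hp, hlt⟩ := hrise
    simp only [decide_eq_true_eq] at hlt
    have hmem := List.of_mem_zip hp
    have hwall : ∀ x ∈ vet ++ [vet.headI, vet.getLastD 0], x = vet.headI := by
      intro x hx
      rcases List.mem_append.mp hx with h | h
      · exact hall x h
      · rcases List.mem_cons.mp h with h | h
        · exact h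
        · simp only [List.mem_singleton] at h
          subst h
          cases vet with
          | nil => exact absurd rfl hne
          | cons a t =>
            rw [List.getLastD_cons]
            exact hall _ List.getLastD_mem_cons
    have e1 := hwall p.1 hmem.1
    have e2 := hwall p.2 (List.mem_of_mem_tail hmem.2)
    omega
  · refine ⟨by decide, ⟨by decide, by intro x hx; fin_cases hx <;> rfl⟩, by decide⟩
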